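-- pv_equiv track=rewrite | github.com/georgkruse/jax_walrus | jax_walrus/model.py | choose_kernel_size_deterministic
-- ===== SOURCE A (Python) =====
-- from typing import List, Optional, Tuple
--
-- _PATCH_DICT = {
--     0: (1, 1),
--     1: (1, 1),
--     4: (2, 2),
--     8: (4, 2),
--     12: (6, 2),
--     16: (4, 4),
--     24: (6, 4),
--     32: (8, 4),
-- }
--
-- def choose_kernel_size_deterministic(
--     x_shape: Tuple[int, ...],
-- ) -> Tuple[Tuple[int, int], ...]:
--     """Choose kernel size deterministically from spatial shape."""
--     dims = len(x_shape)
--     non_singleton = sum(int(s != 1) for s in x_shape)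
--
--     if dims == 1:
--         per_axis = 512 // 16
--         return (_PATCH_DICT[x_shape[0] // per_axis],)
--     elif dims == 2:
--         per_axis = 512 // 16
--         H, W = x_shape
--         return (_PATCH_DICT[H // per_axis], _PATCH_DICT[W // per_axis])
--     elif dims == 3:
--         per_axis = 256 // 16 if non_singleton >= 3 else 512 // 16
--         H, W, D = x_shape
--         h_p = H // per_axis if H != 1 else 0
--         w_p = W // per_axis if W != 1 else 0
--         d_p = D // per_axis if D != 1 else 0
--         return (_PATCH_DICT[h_p], _PATCH_DICT[w_p], _PATCH_DICT[d_p])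
--     else:
--         raise ValueError(f"Spatial dims must be 1-3, got {dims}")
-- ===== SOURCE B (Python) =====
-- # Comparison-based bucketing: instead of dividing and looking the quotient up in a
-- # dict, scan descending patch thresholds (key * per_axis) and take the first one <= s.
-- _THRESHOLDS = [
--     (0, (1, 1)),
--     (1, (1, 1)),
--     (4, (2, 2)),
--     (8, (4, 2)),
--     (12, (6, 2)),
--     (16, (4, 4)),
--     (24, (6, 4)),
--     (32, (8, 4)),
-- ]
--
--
-- def choose_kernel_size_deterministic(x_shape):
--     """Choose kernel size deterministically from spatial shape."""
--     dims = len(x_shape)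
--     if not 1 <= dims <= 3:
--         raise ValueError(f"Spatial dims must be 1-3, got {dims}")
--     per_axis = 16 if sum(s != 1 for s in x_shape) >= 3 else 32
--     out = []
--     for s in x_shape:
--         patch = None
--         for bound, p in reversed(_THRESHOLDS):
--             if bound * per_axis <= s:
--                 patch = p
--                 break
--         out.append(patch)
--     return tuple(out)
-- ===== Notes on version B (the rewrite author's own statement) =====
-- stated objective: alternative
-- what changed: Replaces A's three shape-specific branches with dict lookup of the floor-division quotient by one uniform per-axis pass that picks the patch by scanning descending thresholds (key * per_axis <= s): comparison-based bucketing with no division and no dict, and the s == 1 special case disappears because the 0 threshold always matches.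
import Mathlib
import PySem

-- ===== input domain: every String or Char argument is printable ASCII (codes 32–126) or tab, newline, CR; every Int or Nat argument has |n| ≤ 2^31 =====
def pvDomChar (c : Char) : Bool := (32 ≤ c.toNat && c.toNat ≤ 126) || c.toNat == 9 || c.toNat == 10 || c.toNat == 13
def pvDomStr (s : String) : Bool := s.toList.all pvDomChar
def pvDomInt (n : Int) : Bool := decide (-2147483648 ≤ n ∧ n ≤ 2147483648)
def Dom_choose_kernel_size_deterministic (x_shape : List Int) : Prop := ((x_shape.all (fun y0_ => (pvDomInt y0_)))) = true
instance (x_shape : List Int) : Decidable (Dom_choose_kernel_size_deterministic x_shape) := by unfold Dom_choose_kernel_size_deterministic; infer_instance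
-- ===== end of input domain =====

-- ===== PORT A =====
-- B replaces A's dict-of-quotients lookup and three shape-specific branches by one uniform
-- comparison-based threshold scan per axis (no division, no dict) — objective: alternative.
def pvPatchDict : PySem.Dict Int (Int × Int) :=
  PySem.Dict.ofList [(0,(1,1)),(1,(1,1)),(4,(2,2)),(8,(4,2)),(12,(6,2)),(16,(4,4)),(24,(6,4)),(32,(8,4))]

-- dims ∉ 1..3 raises ValueError, key misses raise KeyError: both excluded by Pre_; the
-- placeholder values used on those inputs ([], (0,0)) are never reached inside Pre_.
def choose_kernel_size_deterministic (x_shape : List Int) : List (Int × Int) :=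
  let dims := x_shape.length
  let non_singleton : Int := (x_shape.map (fun s => if s ≠ 1 then (1:Int) else 0)).sum
  if dims = 1 then
    match x_shape with
    | [a] => [pvPatchDict.getD (PySem.Int.floordiv a (PySem.Int.floordiv 512 16)) (0,0)]
    | _ => []
  else if dims = 2 then
    match x_shape with
    | [h, w] =>
      [pvPatchDict.getD (PySem.Int.floordiv h (PySem.Int.floordiv 512 16)) (0,0),
       pvPatchDict.getD (PySem.Int.floordiv w (PySem.Int.floordiv 512 16)) (0,0)]
    | _ => []
  else if dims = 3 then
    let per_axis : Int := if non_singleton ≥ 3 then PySem.Int.floordiv 256 16 else PySem.Int.floordiv 512 16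
    match x_shape with
    | [h, w, d] =>
      let h_p : Int := if h ≠ 1 then PySem.Int.floordiv h per_axis else 0
      let w_p : Int := if w ≠ 1 then PySem.Int.floordiv w per_axis else 0
      let d_p : Int := if d ≠ 1 then PySem.Int.floordiv d per_axis else 0
      [pvPatchDict.getD h_p (0,0), pvPatchDict.getD w_p (0,0), pvPatchDict.getD d_p (0,0)]
    | _ => []
  else []

-- ===== PORT B =====
def pvThresholds : List (Int × (Int × Int)) :=
  [(0,(1,1)),(1,(1,1)),(4,(2,2)),(8,(4,2)),(12,(6,2)),(16,(4,4)),(24,(6,4)),(32,(8,4))]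

-- B's inner loop with break = find? over the reversed threshold list; the Python leaves
-- patch = None when nothing matches (only outside Pre_), rendered here as (0,0).
def choose_kernel_size_deterministic_alt (x_shape : List Int) : List (Int × Int) :=
  let dims := x_shape.length
  if ¬ (1 ≤ dims ∧ dims ≤ 3) then []
  else
    let per_axis : Int := if 3 ≤ x_shape.countP (fun s => decide (s ≠ 1)) then 16 else 32
    x_shape.map (fun s =>
      match pvThresholds.reverse.find? (fun bp => decide (bp.1 * per_axis ≤ s)) with
      | some bp => bp.2
      | none => (0,0))

-- ===== PRECONDITION & SPEC =====
-- Pre_ excludes exactly the raising inputs: lengths outside 1..3 (ValueError) and shapes whose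
-- per-axis quotient is not a key of _PATCH_DICT (KeyError). A never returns there.
def Pre_choose_kernel_size_deterministic (x_shape : List Int) : Prop :=
  1 ≤ x_shape.length ∧ x_shape.length ≤ 3 ∧
  ∀ s ∈ x_shape,
    PySem.Int.floordiv s (if 3 ≤ x_shape.countP (fun t => decide (t ≠ 1)) then 16 else 32)
      ∈ ([0, 1, 4, 8, 12, 16, 24, 32] : List Int)
instance (x_shape : List Int) : Decidable (Pre_choose_kernel_size_deterministic x_shape) := by
  unfold Pre_choose_kernel_size_deterministic; infer_instance

def pvWitness_choose_kernel_size_deterministic : List Int := [128, 1, 256]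

def Spec_choose_kernel_size_deterministic (x_shape : List Int) (out : List (Int × Int)) : Prop := out = choose_kernel_size_deterministic_alt x_shape
instance (x_shape : List Int) (out : List (Int × Int)) : Decidable (Spec_choose_kernel_size_deterministic x_shape out) := by unfold Spec_choose_kernel_size_deterministic; infer_instance

-- ===== CLAIM (what is proved, stated in full; the proofs are below) =====
def Claim_equal_choose_kernel_size_deterministic : Prop := ∀ (x_shape : List Int), Dom_choose_kernel_size_deterministic x_shape → Pre_choose_kernel_size_deterministic x_shape → Spec_choose_kernel_size_deterministic x_shape (choose_kernel_size_deterministic x_shape)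

-- ===== LEMMAS AND PROOFS =====
-- For one axis value s whose per-axis quotient is a dict key, the dict lookup of the
-- quotient equals the descending-threshold scan.
theorem pv_elem_eq (pa s : Int) (hpa : pa = 16 ∨ pa = 32)
    (h : PySem.Int.floordiv s pa ∈ ([0, 1, 4, 8, 12, 16, 24, 32] : List Int)) :
    pvPatchDict.getD (PySem.Int.floordiv s pa) (0,0)
      = (match pvThresholds.reverse.find? (fun bp => decide (bp.1 * pa ≤ s)) with
         | some bp => bp.2
         | none => (0,0)) := by
  have hrev : pvThresholds.reverse
      = [(32,(8,4)),(24,(6,4)),(16,(4,4)),(12,(6,2)),(8,(4,2)),(4,(2,2)),(1,(1,1)),(0,(1,1))] := by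
    decide
  have hdiv : ∀ pa : Int, 0 < pa → PySem.Int.floordiv s pa = s / pa := by
    intro pa hpos
    simp [PySem.Int.floordiv, Int.fdiv_eq_ediv]
    intro hneg; omega
  rcases hpa with hp | hp <;> subst hp <;>
  · rw [hdiv _ (by omega)] at h ⊢
    rw [hrev]
    simp only [List.mem_cons, List.not_mem_nil, or_false] at h
    rcases h with h | h | h | h | h | h | h | h <;>
      (rw [h]
       repeat first
         | rw [List.find?_cons_of_neg (by simp only [decide_eq_true_eq]; omega)]
         | rw [List.find?_cons_of_pos (by simp only [decide_eq_true_eq]; omega)]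
       decide)

-- countP over Int as the integer sum of A's indicator map
theorem pv_cnt (l : List Int) :
    ((l.map (fun s => if s ≠ 1 then (1:Int) else 0)).sum)
      = ((l.countP (fun s => decide (s ≠ 1)) : Nat) : Int) := by
  induction l with
  | nil => simp
  | cons x xs ih =>
      simp only [List.map_cons, List.sum_cons, List.countP_cons, ih]
      by_cases hx : x = 1 <;> simp [hx] <;> ring

-- A's 3-dim component (with its s = 1 special case) equals B's threshold scan
theorem pv_elem3_eq (pa s : Int) (hpa : pa = 16 ∨ pa = 32)
    (h : PySem.Int.floordiv s pa ∈ ([0, 1, 4, 8, 12, 16, 24, 32] : List Int)) :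
    pvPatchDict.getD (if s ≠ 1 then PySem.Int.floordiv s pa else 0) (0,0)
      = (match pvThresholds.reverse.find? (fun bp => decide (bp.1 * pa ≤ s)) with
         | some bp => bp.2
         | none => (0,0)) := by
  by_cases h1 : s = 1
  · subst h1
    rcases hpa with hp | hp <;> subst hp <;> decide
  · rw [if_pos h1]
    exact pv_elem_eq pa s hpa h

theorem choose_spec_aux (x_shape : List Int)
    (hpre : Pre_choose_kernel_size_deterministic x_shape) :
    choose_kernel_size_deterministic x_shape = choose_kernel_size_deterministic_alt x_shape := by
  obtain ⟨hl1, hl2, hkeys⟩ := hpre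
  have h512 : PySem.Int.floordiv 512 16 = 32 := by decide
  have h256 : PySem.Int.floordiv 256 16 = 16 := by decide
  match x_shape with
  | [] => simp at hl1
  | [a] =>
      have ha := hkeys a (by simp)
      have hlow : ¬ 3 ≤ (([a] : List Int).countP (fun s => decide (s ≠ 1))) := by
        have := List.countP_le_length (p := fun s : Int => decide (s ≠ 1)) (l := [a])
        simp only [List.length_cons, List.length_nil] at this; omega
      rw [if_neg hlow] at ha
      simp only [choose_kernel_size_deterministic, choose_kernel_size_deterministic_alt,
        List.length_cons, List.length_nil, Nat.reduceAdd, reduceIte]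
      rw [if_neg (show ¬¬((1:Nat) ≤ 1 ∧ (1:Nat) ≤ 3) from by decide), h512, if_neg hlow]
      simp only [List.map_cons, List.map_nil]
      rw [pv_elem_eq 32 a (Or.inr rfl) ha]
  | [a, b] =>
      have ha := hkeys a (by simp)
      have hb := hkeys b (by simp)
      have hlow : ¬ 3 ≤ (([a, b] : List Int).countP (fun s => decide (s ≠ 1))) := by
        have := List.countP_le_length (p := fun s : Int => decide (s ≠ 1)) (l := [a, b])
        simp only [List.length_cons, List.length_nil] at this; omega
      rw [if_neg hlow] at ha hb
      simp only [choose_kernel_size_deterministic, choose_kernel_size_deterministic_alt,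
        List.length_cons, List.length_nil, Nat.reduceAdd, reduceIte,
        show ((2:Nat) = 1) = False from by decide]
      rw [if_neg (show ¬¬((1:Nat) ≤ 2 ∧ (2:Nat) ≤ 3) from by decide), h512, if_neg hlow]
      simp only [List.map_cons, List.map_nil]
      rw [pv_elem_eq 32 a (Or.inr rfl) ha, pv_elem_eq 32 b (Or.inr rfl) hb]
  | [a, b, c] =>
      have ha := hkeys a (by simp)
      have hb := hkeys b (by simp)
      have hc := hkeys c (by simp)
      simp only [choose_kernel_size_deterministic, choose_kernel_size_deterministic_alt,
        List.length_cons, List.length_nil, Nat.reduceAdd, reduceIte,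
        show ((3:Nat) = 1) = False from by decide, show ((3:Nat) = 2) = False from by decide]
      rw [if_neg (show ¬¬((1:Nat) ≤ 3 ∧ (3:Nat) ≤ 3) from by decide), h512, h256]
      by_cases hcc : 3 ≤ (([a, b, c] : List Int).countP (fun s => decide (s ≠ 1)))
      · have hA : ((([a, b, c] : List Int).map (fun s => if s ≠ 1 then (1:Int) else 0)).sum ≥ 3) := by
          rw [pv_cnt]; exact_mod_cast hcc
        rw [if_pos hcc] at ha hb hc
        rw [if_pos hA, if_pos hcc]
        simp only [List.map_cons, List.map_nil]
        rw [pv_elem3_eq 16 a (Or.inl rfl) ha, pv_elem3_eq 16 b (Or.inl rfl) hb,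
            pv_elem3_eq 16 c (Or.inl rfl) hc]
      · have hA : ¬ ((([a, b, c] : List Int).map (fun s => if s ≠ 1 then (1:Int) else 0)).sum ≥ 3) := by
          rw [pv_cnt]; intro hge; exact hcc (by exact_mod_cast hge)
        rw [if_neg hcc] at ha hb hc
        rw [if_neg hA, if_neg hcc]
        simp only [List.map_cons, List.map_nil]
        rw [pv_elem3_eq 32 a (Or.inr rfl) ha, pv_elem3_eq 32 b (Or.inr rfl) hb,
            pv_elem3_eq 32 c (Or.inr rfl) hc]
  | _ :: _ :: _ :: _ :: _ =>
      exfalso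
      simp only [List.length_cons] at hl2
      omega

-- ===== VERDICT (by name: the statement is the Claim_ definition above) =====
theorem choose_kernel_size_deterministic_spec : Claim_equal_choose_kernel_size_deterministic := by
  intro x_shape _ hpre
  exact choose_spec_aux x_shape hpre
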